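-- pv_equiv track=rewrite | github.com/djcarvi/neuraudit-colombia | backend/apps/authentication/security_management.py | _determinar_nivel_amenaza
-- ===== SOURCE A (Python) =====
-- def _determinar_nivel_amenaza(threats, stats):
--     """Determina el nivel de amenaza actual del sistema"""
--     if not threats:
--         return 'BAJO'
--
--     # Contar amenazas críticas en las últimas 24 horas
--     amenazas_criticas = sum(1 for t in threats if t.get('severity') == 'CRITICO')
--     amenazas_altas = sum(1 for t in threats if t.get('severity') == 'ALTO')
--
--     intentos_fallidos = stats.get('intentos_fallidos_24h', 0)
--     cuentas_bloqueadas = stats.get('cuentas_bloqueadas', 0)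
--
--     if amenazas_criticas > 5 or intentos_fallidos > 100 or cuentas_bloqueadas > 10:
--         return 'CRITICO'
--     elif amenazas_criticas > 2 or amenazas_altas > 10 or intentos_fallidos > 50:
--         return 'ALTO'
--     elif amenazas_altas > 5 or intentos_fallidos > 20:
--         return 'MEDIO'
--     else:
--         return 'BAJO'
-- ===== SOURCE B (Python) =====
-- def _determinar_nivel_amenaza(threats, stats):
--     """Determina el nivel de amenaza actual del sistema"""
--     if not threats:
--         return 'BAJO'
--
--     fallidos = stats.get('intentos_fallidos_24h', 0)
--     bloqueadas = stats.get('cuentas_bloqueadas', 0)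
--
--     # Stats alone can force CRITICO before looking at any threat
--     if fallidos > 100 or bloqueadas > 10:
--         return 'CRITICO'
--
--     # Single scan with early exit: the 6th CRITICO threat decides the answer
--     # immediately; the ALTO counter saturates at 11 (only >10 / >5 are tested).
--     criticas = 0
--     altas = 0
--     for t in threats:
--         s = t.get('severity')
--         if s == 'CRITICO':
--             criticas += 1
--             if criticas > 5:
--                 return 'CRITICO'
--         elif s == 'ALTO':
--             if altas <= 10:
--                 altas += 1
--
--     if criticas > 2 or fallidos > 50 or altas > 10:
--         return 'ALTO'
--     if altas > 5 or fallidos > 20: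
--         return 'MEDIO'
--     return 'BAJO'
-- ===== Notes on version B (the rewrite author's own statement) =====
-- stated objective: alternative
-- what changed: Instead of two full comprehension counts followed by a threshold cascade, B checks the stats-only CRITICO conditions up front and then makes one early-exit scan over threats that returns 'CRITICO' the moment the critical count exceeds 5 and keeps only a saturating (capped at 11) ALTO counter, deciding the remaining levels from the bounded state after the scan.
import Mathlib
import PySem

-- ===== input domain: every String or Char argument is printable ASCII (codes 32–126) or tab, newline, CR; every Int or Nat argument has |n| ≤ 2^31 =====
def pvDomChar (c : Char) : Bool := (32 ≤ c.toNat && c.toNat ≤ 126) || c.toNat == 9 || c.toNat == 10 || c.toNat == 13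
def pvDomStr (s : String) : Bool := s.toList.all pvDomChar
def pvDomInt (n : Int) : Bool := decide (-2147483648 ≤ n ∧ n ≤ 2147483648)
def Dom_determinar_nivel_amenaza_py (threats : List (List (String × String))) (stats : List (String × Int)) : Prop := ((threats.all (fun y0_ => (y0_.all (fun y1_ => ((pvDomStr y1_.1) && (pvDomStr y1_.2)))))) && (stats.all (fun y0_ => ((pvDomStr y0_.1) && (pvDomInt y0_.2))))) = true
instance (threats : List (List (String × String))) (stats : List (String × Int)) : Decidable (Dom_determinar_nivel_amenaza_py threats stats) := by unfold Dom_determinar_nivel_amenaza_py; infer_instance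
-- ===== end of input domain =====

-- ===== PORT A =====
-- B replaces A's two full counting passes + cascade with one early-exit scan over
-- threats using bounded saturating state (alternative decomposition, same cost;
-- return value only).
def determinar_nivel_amenaza_py (threats : List (List (String × String))) (stats : List (String × Int)) : String :=
  if threats = [] then "BAJO"
  else
    let amenazas_criticas : Int :=
      threats.foldl (fun acc t =>
        if (PySem.Dict.mk t).get? "severity" = some "CRITICO" then acc + 1 else acc) 0
    let amenazas_altas : Int :=
      threats.foldl (fun acc t =>
        if (PySem.Dict.mk t).get? "severity" = some "ALTO" then acc + 1 else acc) 0
    let intentos_fallidos := (PySem.Dict.mk stats).getD "intentos_fallidos_24h" 0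
    let cuentas_bloqueadas := (PySem.Dict.mk stats).getD "cuentas_bloqueadas" 0
    if amenazas_criticas > 5 ∨ intentos_fallidos > 100 ∨ cuentas_bloqueadas > 10 then "CRITICO"
    else if amenazas_criticas > 2 ∨ amenazas_altas > 10 ∨ intentos_fallidos > 50 then "ALTO"
    else if amenazas_altas > 5 ∨ intentos_fallidos > 20 then "MEDIO"
    else "BAJO"

-- ===== PORT B =====
-- the loop of Source B: early return 'CRITICO' inside the scan, saturating ALTO counter,
-- then the post-scan decisions; `fallidos` is threaded since the tail tests use it.
def pvScanThreats (fallidos : Int) (criticas altas : Int) : List (List (String × String)) → String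
  | [] =>
    if criticas > 2 ∨ fallidos > 50 ∨ altas > 10 then "ALTO"
    else if altas > 5 ∨ fallidos > 20 then "MEDIO"
    else "BAJO"
  | t :: ts =>
    let s := (PySem.Dict.mk t).get? "severity"
    if s = some "CRITICO" then
      if criticas + 1 > 5 then "CRITICO"
      else pvScanThreats fallidos (criticas + 1) altas ts
    else if s = some "ALTO" then
      pvScanThreats fallidos criticas (if altas ≤ 10 then altas + 1 else altas) ts
    else pvScanThreats fallidos criticas altas ts

def determinar_nivel_amenaza_py_alt (threats : List (List (String × String))) (stats : List (String × Int)) : String :=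
  if threats = [] then "BAJO"
  else
    let fallidos := (PySem.Dict.mk stats).getD "intentos_fallidos_24h" 0
    let bloqueadas := (PySem.Dict.mk stats).getD "cuentas_bloqueadas" 0
    if fallidos > 100 ∨ bloqueadas > 10 then "CRITICO"
    else pvScanThreats fallidos 0 0 threats

-- ===== PRECONDITION & SPEC =====
def Spec_determinar_nivel_amenaza_py (threats : List (List (String × String))) (stats : List (String × Int)) (out : String) : Prop := out = determinar_nivel_amenaza_py_alt threats stats
instance (threats : List (List (String × String))) (stats : List (String × Int)) (out : String) : Decidable (Spec_determinar_nivel_amenaza_py threats stats out) := by unfold Spec_determinar_nivel_amenaza_py; infer_instance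

-- ===== CLAIM (what is proved, stated in full; the proofs are below) =====
def Claim_equal_determinar_nivel_amenaza_py : Prop := ∀ (threats : List (List (String × String))) (stats : List (String × Int)), Dom_determinar_nivel_amenaza_py threats stats → Spec_determinar_nivel_amenaza_py threats stats (determinar_nivel_amenaza_py threats stats)

-- ===== LEMMAS AND PROOFS =====
-- exact counts of CRITICO / ALTO severities, as naturals
def pvCntC (ts : List (List (String × String))) : Nat :=
  ts.countP (fun t => (PySem.Dict.mk t).get? "severity" = some "CRITICO")
def pvCntA (ts : List (List (String × String))) : Nat :=
  ts.countP (fun t => (PySem.Dict.mk t).get? "severity" = some "ALTO")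

-- the tail of A's cascade (everything below the CRITICO line), as a function of the counts
def pvTail (f C A : Int) : String :=
  if C > 5 then "CRITICO"
  else if C > 2 ∨ A > 10 ∨ f > 50 then "ALTO"
  else if A > 5 ∨ f > 20 then "MEDIO"
  else "BAJO"

lemma foldl_cntC (ts : List (List (String × String))) (init : Int) :
    ts.foldl (fun acc t => if (PySem.Dict.mk t).get? "severity" = some "CRITICO" then acc + 1 else acc) init
      = init + (pvCntC ts : Int) := by
  induction ts generalizing init with
  | nil => simp [pvCntC]
  | cons t ts ih =>
    by_cases h : (PySem.Dict.mk t).get? "severity" = some "CRITICO" <;>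
      simp [pvCntC, List.countP_cons, h, ih] at * <;> push_cast <;> ring

lemma foldl_cntA (ts : List (List (String × String))) (init : Int) :
    ts.foldl (fun acc t => if (PySem.Dict.mk t).get? "severity" = some "ALTO" then acc + 1 else acc) init
      = init + (pvCntA ts : Int) := by
  induction ts generalizing init with
  | nil => simp [pvCntA]
  | cons t ts ih =>
    by_cases h : (PySem.Dict.mk t).get? "severity" = some "ALTO" <;>
      simp [pvCntA, List.countP_cons, h, ih] at * <;> push_cast <;> ring

-- the early-exit saturating scan computes A's cascade tail (criticas so far ≤ 5,
-- altas so far = the real ALTO count seen, saturated at 11)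
lemma scan_eq (f : Int) (ts : List (List (String × String))) :
    ∀ (c : Int) (a' : Nat), c ≤ 5 →
    pvScanThreats f c (min (a' : Int) 11) ts
      = pvTail f (c + (pvCntC ts : Int)) ((a' : Int) + (pvCntA ts : Int)) := by
  induction ts with
  | nil =>
    intro c a' hc
    simp only [pvScanThreats, pvCntC, pvCntA, pvTail, List.countP_nil]
    by_cases h : (a' : Int) ≤ 11
    · rw [min_eq_left h]; split_ifs <;> first | rfl | (exfalso; omega)
    · rw [min_eq_right (by omega)]; split_ifs <;> first | rfl | (exfalso; omega)
  | cons t ts ih =>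
    intro c a' hc
    by_cases hC : (PySem.Dict.mk t).get? "severity" = some "CRITICO"
    · have hcnt : pvCntC (t :: ts) = pvCntC ts + 1 := by
        simp [pvCntC, hC]
      have hcnta : pvCntA (t :: ts) = pvCntA ts := by
        simp [pvCntA, hC]
      simp only [pvScanThreats, hC, if_pos, hcnt, hcnta]
      by_cases h6 : c + 1 > 5
      · rw [if_pos h6]
        unfold pvTail
        split_ifs with h1 <;> first | rfl | (exfalso; push_cast at h1; omega)
      · rw [if_neg h6, ih (c + 1) a' (by omega)]
        have e1 : c + 1 + (pvCntC ts : Int) = c + ((pvCntC ts + 1 : Nat) : Int) := by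
          push_cast; ring
        rw [e1]
    · by_cases hA : (PySem.Dict.mk t).get? "severity" = some "ALTO"
      · have hcnt : pvCntC (t :: ts) = pvCntC ts := by
          simp [pvCntC, hC]
        have hcnta : pvCntA (t :: ts) = pvCntA ts + 1 := by
          simp [pvCntA, hA]
        have hmin : (if min ((a' : Int)) 11 ≤ 10 then min ((a' : Int)) 11 + 1 else min ((a' : Int)) 11)
            = min (((a' + 1 : Nat)) : Int) 11 := by
          simp only [min_def]; push_cast; split_ifs <;> omega
        simp only [pvScanThreats, hC, hA, if_pos, hmin, hcnt, hcnta]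
        rw [if_neg (show ¬(some "ALTO" = some "CRITICO") by decide), ih c (a' + 1) hc]
        have e1 : ((a' + 1 : Nat) : Int) + (pvCntA ts : Int) = (a' : Int) + ((pvCntA ts + 1 : Nat) : Int) := by
          push_cast; ring
        rw [e1]
      · have hcnt : pvCntC (t :: ts) = pvCntC ts := by
          simp [pvCntC, hC]
        have hcnta : pvCntA (t :: ts) = pvCntA ts := by
          simp [pvCntA, hA]
        simp only [pvScanThreats, hC, hA, hcnt, hcnta]
        exact ih c a' hc

-- ===== VERDICT (by name: the statement is the Claim_ definition above) =====
theorem determinar_nivel_amenaza_py_spec : Claim_equal_determinar_nivel_amenaza_py := by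
  intro threats stats _
  unfold Spec_determinar_nivel_amenaza_py determinar_nivel_amenaza_py determinar_nivel_amenaza_py_alt
  by_cases h : threats = []
  · simp [h]
  · simp only [h, if_false]
    rw [foldl_cntC, foldl_cntA]
    have hs := scan_eq ((PySem.Dict.mk stats).getD "intentos_fallidos_24h" 0) threats 0 (0 : Nat) (by norm_num)
    norm_num at hs
    rw [hs]
    unfold pvTail
    by_cases hcrit : ((PySem.Dict.mk stats).getD "intentos_fallidos_24h" 0 > 100 ∨ (PySem.Dict.mk stats).getD "cuentas_bloqueadas" 0 > 10)
    · rw [if_pos hcrit]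
      split_ifs with h1 <;> first | rfl | (exfalso; omega)
    · rw [if_neg hcrit]
      split_ifs <;> first | rfl | omega | (exfalso; omega) | tauto
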